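-- pv_equiv track=rewrite | github.com/ahmedbakr11/Email-Phishing-Analysis-and-Detection- | backend/Tools/phishing_email_analyzer/detection.py | detect_social_engineering_language
-- ===== SOURCE A (Python) =====
-- from typing import Dict, Iterable, List, Union
--
-- def detect_social_engineering_language(text_parts: Iterable[str], keywords: List[str]) -> List[Dict[str, str]]:
--     """Identify urgent or coercive language patterns."""
--     findings: List[Dict[str, str]] = []
--     for text in text_parts:
--         lowered = text.lower()
--         if any(keyword in lowered for keyword in keywords):
--             findings.append(
--                 {"reason": "social_engineering_language", "snippet": text[:120]}
--             )
--     return findings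
-- ===== SOURCE B (Python) =====
-- def detect_social_engineering_language(text_parts, keywords):
--     """Identify urgent or coercive language patterns."""
--     texts = list(text_parts)
--     pending = [(i, text.lower()) for i, text in enumerate(texts)]
--     for keyword in keywords:
--         pending = [p for p in pending if keyword not in p[1]]
--         if not pending:
--             break
--     missed = {p[0] for p in pending}
--     return [
--         {"reason": "social_engineering_language", "snippet": text[:120]}
--         for i, text in enumerate(texts)
--         if i not in missed
--     ]
-- ===== Notes on version B (the rewrite author's own statement) =====
-- stated objective: alternative
-- what changed: A loops text-by-text, re-testing the whole keyword list inside each iteration; B transposes the loops: it lowercases every text once into a pending list of (index, lowered) pairs, narrows that list keyword-by-keyword (stopping once it is empty), and finally emits the findings for the non-surviving indices in one ordered pass over the texts.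
import Mathlib
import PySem

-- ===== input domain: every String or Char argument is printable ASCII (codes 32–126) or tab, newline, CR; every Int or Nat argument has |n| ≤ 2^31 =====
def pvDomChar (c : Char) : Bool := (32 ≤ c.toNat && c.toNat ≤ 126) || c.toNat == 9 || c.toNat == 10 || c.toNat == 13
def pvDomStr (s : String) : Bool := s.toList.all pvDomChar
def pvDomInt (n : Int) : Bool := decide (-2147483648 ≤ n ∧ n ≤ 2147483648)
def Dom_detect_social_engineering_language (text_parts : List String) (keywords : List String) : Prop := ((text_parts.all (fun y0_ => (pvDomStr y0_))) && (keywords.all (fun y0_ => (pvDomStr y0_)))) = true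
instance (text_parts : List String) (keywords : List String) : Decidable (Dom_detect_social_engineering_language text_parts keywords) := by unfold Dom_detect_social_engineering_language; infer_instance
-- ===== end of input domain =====

-- B transposes A's loops: keyword-by-keyword passes narrow a pending list of (index, lowered text) pairs (stopping when it empties), then one ordered pass emits the findings; objective: alternative.

-- ===== PORT A =====
def detect_social_engineering_language (text_parts : List String) (keywords : List String) : List (List (String × String)) :=
  text_parts.foldl (fun findings text =>
    let lowered := PySem.Str.lower text
    if keywords.any (fun keyword => PySem.Str.isIn keyword lowered) then
      findings ++ [[("reason", "social_engineering_language"),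
                    ("snippet", PySem.Str.slice text none (some 120))]]
    else findings) []

-- ===== PORT B =====
-- one pass per keyword over the still-pending (index, lowered text) pairs; stop when none are left
def pvSweep : List String → List (Int × String) → List (Int × String)
  | [], pending => pending
  | keyword :: kws, pending =>
      let pending2 := pending.filter (fun p => !(PySem.Str.isIn keyword p.2))
      if pending2.isEmpty then pending2 else pvSweep kws pending2

def detect_social_engineering_language_alt (text_parts : List String) (keywords : List String) : List (List (String × String)) :=
  let pending := (PySem.List.enumerate text_parts).map (fun p => (p.1, PySem.Str.lower p.2))
  let missed := PySem.Set.ofList ((pvSweep keywords pending).map (fun p => p.1))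
  ((PySem.List.enumerate text_parts).filter (fun p => !(PySem.Set.contains missed p.1))).map
    (fun p => [("reason", "social_engineering_language"),
               ("snippet", PySem.Str.slice p.2 none (some 120))])

-- ===== PRECONDITION & SPEC =====
def Spec_detect_social_engineering_language (text_parts : List String) (keywords : List String) (out : List (List (String × String))) : Prop := out = detect_social_engineering_language_alt text_parts keywords
instance (text_parts : List String) (keywords : List String) (out : List (List (String × String))) : Decidable (Spec_detect_social_engineering_language text_parts keywords out) := by unfold Spec_detect_social_engineering_language; infer_instance

-- ===== CLAIM (what is proved, stated in full; the proofs are below) =====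
def Claim_equal_detect_social_engineering_language : Prop := ∀ (text_parts : List String) (keywords : List String), Dom_detect_social_engineering_language text_parts keywords → Spec_detect_social_engineering_language text_parts keywords (detect_social_engineering_language text_parts keywords)

-- ===== LEMMAS AND PROOFS =====

-- a pair survives the sweep iff no processed keyword matches its lowered text
theorem pv_mem_sweep (kws : List String) (pending : List (Int × String)) (p : Int × String) :
    (p ∈ pvSweep kws pending) ↔
      p ∈ pending ∧ ∀ kw ∈ kws, PySem.Str.isIn kw p.2 = false := by
  induction kws generalizing pending with
  | nil => simp [pvSweep]
  | cons kw kws ih =>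
    simp only [pvSweep]
    by_cases he : (pending.filter (fun q => !(PySem.Str.isIn kw q.2))).isEmpty
    · rw [if_pos he]
      rw [List.isEmpty_iff] at he
      rw [he]
      simp only [List.not_mem_nil, false_iff, not_and]
      intro hp hall
      have hmem : p ∈ pending.filter (fun q => !(PySem.Str.isIn kw q.2)) := by
        rw [List.mem_filter]
        refine ⟨hp, ?_⟩
        rw [hall kw (by simp)]
        rfl
      rw [he] at hmem
      simp at hmem
    · rw [if_neg he, ih]
      simp only [List.mem_filter, List.mem_cons, Bool.not_eq_eq_eq_not, Bool.not_true]
      constructor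
      · rintro ⟨⟨hp, hkw⟩, hrest⟩
        exact ⟨hp, fun k hk => hk.elim (fun h => h ▸ hkw) (hrest k)⟩
      · rintro ⟨hp, hall⟩
        exact ⟨⟨hp, hall kw (Or.inl rfl)⟩, fun k hk => hall k (Or.inr hk)⟩

-- the per-index test after the sweep is exactly A's per-text test
theorem pv_flag_char (text_parts keywords : List String) (k : Nat) (hk : k < text_parts.length) :
    (!(PySem.Set.contains (PySem.Set.ofList ((pvSweep keywords
        ((PySem.List.enumerate text_parts).map (fun p => (p.1, PySem.Str.lower p.2)))).map
        (fun p => p.1))) ((k : Int)))) =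
      keywords.any (fun keyword => PySem.Str.isIn keyword (PySem.Str.lower text_parts[k])) := by
  apply Bool.eq_iff_iff.mpr
  rw [Bool.not_eq_eq_eq_not, Bool.not_true, ← Bool.not_eq_true, PySem.Set.contains_iff]
  simp only [PySem.Set.mem_ofList, List.mem_map, pv_mem_sweep, List.mem_map,
    PySem.List.mem_enumerate_iff, List.any_eq_true]
  constructor
  · intro h
    by_contra hno
    push Not at hno
    refine h ⟨((k : Int), PySem.Str.lower text_parts[k]), ⟨⟨((k : Int), text_parts[k]),
      ⟨k, hk, by simp⟩, rfl⟩, ?_⟩, rfl⟩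
    intro kw hkw
    exact (Bool.not_eq_true _).mp (fun ht => by simpa using hno kw hkw ht)
  · rintro ⟨kw, hkw, hin⟩ ⟨a, ⟨⟨a1, ⟨j, hj, rfl⟩, rfl⟩, hall⟩, hq1⟩
    simp only [zero_add] at hq1
    have hjk : j = k := by exact_mod_cast hq1
    subst hjk
    have := hall kw hkw
    rw [hin] at this
    simp at this

-- filtering enumerate(xs) by a test on the element and projecting the element back
theorem pv_filter_enumerate_map {α β : Type} (pred : α → Bool) (g : α → β) (xs : List α) (s : Int) :
    (((PySem.List.enumerate xs s).filter (fun p => pred p.2)).map (fun p => g p.2)) =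
      (xs.filter pred).map g := by
  induction xs generalizing s with
  | nil => simp [PySem.List.enumerate]
  | cons x xs ih =>
    rw [PySem.List.enumerate_cons]
    by_cases hp : pred x
    · simp only [List.filter_cons, hp]
      simp [ih]
    · simp only [List.filter_cons, hp]
      simp [ih]

-- ===== VERDICT (by name: the statement is the Claim_ definition above) =====
theorem detect_social_engineering_language_spec : Claim_equal_detect_social_engineering_language := by
  intro text_parts keywords _
  unfold Spec_detect_social_engineering_language detect_social_engineering_language
    detect_social_engineering_language_alt
  dsimp only
  rw [PySem.List.foldl_append_if
    (p := fun text => keywords.any (fun keyword => PySem.Str.isIn keyword (PySem.Str.lower text)))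
    (f := fun text => [("reason", "social_engineering_language"),
                       ("snippet", PySem.Str.slice text none (some 120))])]
  rw [List.nil_append]
  have hcongr : (PySem.List.enumerate text_parts).filter
      (fun p => !(PySem.Set.contains (PySem.Set.ofList ((pvSweep keywords
        ((PySem.List.enumerate text_parts).map (fun q => (q.1, PySem.Str.lower q.2)))).map
        (fun q => q.1))) p.1)) =
      (PySem.List.enumerate text_parts).filter
      (fun p => keywords.any (fun keyword => PySem.Str.isIn keyword (PySem.Str.lower p.2))) := by
    apply List.filter_congr
    intro p hp
    rw [PySem.List.mem_enumerate_iff] at hp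
    obtain ⟨k, hk, rfl⟩ := hp
    simpa using pv_flag_char text_parts keywords k hk
  rw [hcongr]
  exact (pv_filter_enumerate_map
    (pred := fun text => keywords.any (fun keyword => PySem.Str.isIn keyword (PySem.Str.lower text)))
    (g := fun text => [("reason", "social_engineering_language"),
                       ("snippet", PySem.Str.slice text none (some 120))]) text_parts 0).symm
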